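-- pv_equiv track=rewrite | github.com/Party-Parrots-Organization/PSA-Back_End | server/weather_client.py | get_weather_severity
-- ===== SOURCE A (Python) =====
-- def get_weather_severity(weather_code):
--     # Weather Categories:
--     # 0: Good
--     # 1: Moderately Bad
--     # 2: Very Bad
--     weather_categories = {
--         0 : [1000, 1100, 1101, 1103, 1102, 2100, 2101, 2102, 2106, 2107, 2108,
--                 4203, 4205, 4213, 4214, 4215],
--         9 : [4000, 4200, 4204, 4208, 5100, 5102, 5103, 5104,
--                         5105, 5106, 5107, 6000, 6003, 6002, 6004, 6200,
--                         6213, 6214, 6215],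
--         28 : [8000, 8001, 8002, 8003]
--     }
--     # Iterate through weather categories and determine severity
--     for severity, codes in weather_categories.items():
--         if weather_code in codes:
--             return severity
--
--     # Return -1 for unknown weather code
--     return 0
-- ===== SOURCE B (Python) =====
-- # One flat code->severity dict built once; a single hash lookup replaces the category loop and list scans.
-- _SEVERITIES = {
--     1000: 0, 1100: 0, 1101: 0, 1103: 0, 1102: 0, 2100: 0, 2101: 0, 2102: 0,
--     2106: 0, 2107: 0, 2108: 0, 4203: 0, 4205: 0, 4213: 0, 4214: 0, 4215: 0,
--     4000: 9, 4200: 9, 4204: 9, 4208: 9, 5100: 9, 5102: 9, 5103: 9, 5104: 9,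
--     5105: 9, 5106: 9, 5107: 9, 6000: 9, 6003: 9, 6002: 9, 6004: 9, 6200: 9,
--     6213: 9, 6214: 9, 6215: 9,
--     8000: 28, 8001: 28, 8002: 28, 8003: 28,
-- }
--
-- def get_weather_severity(weather_code):
--     return _SEVERITIES.get(weather_code, 0)
-- ===== Notes on version B (the rewrite author's own statement) =====
-- stated objective: simpler
-- what changed: Replaces the dict-of-code-lists with its category loop and per-list membership scan by one flat code-to-severity dict built once, so the function body is a single dict.get(weather_code, 0) lookup.
import Mathlib
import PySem

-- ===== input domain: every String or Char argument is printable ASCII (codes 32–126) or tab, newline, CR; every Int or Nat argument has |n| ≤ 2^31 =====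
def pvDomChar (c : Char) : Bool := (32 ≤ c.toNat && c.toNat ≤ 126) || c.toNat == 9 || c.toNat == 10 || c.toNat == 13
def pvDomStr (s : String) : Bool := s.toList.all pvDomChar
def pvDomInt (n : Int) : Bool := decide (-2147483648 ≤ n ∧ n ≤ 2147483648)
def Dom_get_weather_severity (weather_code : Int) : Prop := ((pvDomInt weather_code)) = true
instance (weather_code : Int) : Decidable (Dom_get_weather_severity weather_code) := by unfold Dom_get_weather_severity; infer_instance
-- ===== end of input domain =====

-- B replaces A's category loop and per-list membership scans by one flat code→severity dict and a single lookup (simpler).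

-- ===== PORT A =====
-- the 'for severity, codes in weather_categories.items(): if weather_code in codes: return severity' loop
def pvLoopA (items : List (Int × List Int)) (wc : Int) : Int :=
  match items with
  | [] => 0
  | (severity, codes) :: rest => if codes.contains wc then severity else pvLoopA rest wc

def get_weather_severity (weather_code : Int) : Int :=
  let weather_categories : PySem.Dict Int (List Int) := PySem.Dict.ofList
    [ (0, [1000, 1100, 1101, 1103, 1102, 2100, 2101, 2102, 2106, 2107, 2108,
           4203, 4205, 4213, 4214, 4215]),
      (9, [4000, 4200, 4204, 4208, 5100, 5102, 5103, 5104,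
           5105, 5106, 5107, 6000, 6003, 6002, 6004, 6200,
           6213, 6214, 6215]),
      (28, [8000, 8001, 8002, 8003]) ]
  pvLoopA weather_categories.items weather_code

-- ===== PORT B =====
def pvSeverities : PySem.Dict Int Int := PySem.Dict.ofList
  [ (1000, 0), (1100, 0), (1101, 0), (1103, 0), (1102, 0), (2100, 0), (2101, 0), (2102, 0),
    (2106, 0), (2107, 0), (2108, 0), (4203, 0), (4205, 0), (4213, 0), (4214, 0), (4215, 0),
    (4000, 9), (4200, 9), (4204, 9), (4208, 9), (5100, 9), (5102, 9), (5103, 9), (5104, 9),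
    (5105, 9), (5106, 9), (5107, 9), (6000, 9), (6003, 9), (6002, 9), (6004, 9), (6200, 9),
    (6213, 9), (6214, 9), (6215, 9),
    (8000, 28), (8001, 28), (8002, 28), (8003, 28) ]

def get_weather_severity_alt (weather_code : Int) : Int :=
  pvSeverities.getD weather_code 0

-- ===== PRECONDITION & SPEC =====
def Spec_get_weather_severity (weather_code : Int) (out : Int) : Prop := out = get_weather_severity_alt weather_code
instance (weather_code : Int) (out : Int) : Decidable (Spec_get_weather_severity weather_code out) := by unfold Spec_get_weather_severity; infer_instance

-- ===== CLAIM (what is proved, stated in full; the proofs are below) =====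
def Claim_equal_get_weather_severity : Prop := ∀ (weather_code : Int), Dom_get_weather_severity weather_code → Spec_get_weather_severity weather_code (get_weather_severity weather_code)

-- ===== LEMMAS AND PROOFS =====
def pvAllCodes : List Int :=
  [1000, 1100, 1101, 1103, 1102, 2100, 2101, 2102, 2106, 2107, 2108,
   4203, 4205, 4213, 4214, 4215,
   4000, 4200, 4204, 4208, 5100, 5102, 5103, 5104,
   5105, 5106, 5107, 6000, 6003, 6002, 6004, 6200,
   6213, 6214, 6215, 8000, 8001, 8002, 8003]

set_option maxRecDepth 10000 in
set_option maxHeartbeats 2000000 in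
theorem pv_unknown_eq (wc : Int) (h : wc ∉ pvAllCodes) :
    get_weather_severity wc = 0 ∧ get_weather_severity_alt wc = 0 := by
  simp only [pvAllCodes, List.mem_cons, List.not_mem_nil, or_false, not_or] at h
  have hA : (PySem.Dict.ofList
    [ ((0:Int), [(1000:Int), 1100, 1101, 1103, 1102, 2100, 2101, 2102, 2106, 2107, 2108,
           4203, 4205, 4213, 4214, 4215]),
      (9, [4000, 4200, 4204, 4208, 5100, 5102, 5103, 5104,
           5105, 5106, 5107, 6000, 6003, 6002, 6004, 6200,
           6213, 6214, 6215]),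
      (28, [8000, 8001, 8002, 8003]) ]).items =
    [ ((0:Int), [(1000:Int), 1100, 1101, 1103, 1102, 2100, 2101, 2102, 2106, 2107, 2108,
           4203, 4205, 4213, 4214, 4215]),
      (9, [4000, 4200, 4204, 4208, 5100, 5102, 5103, 5104,
           5105, 5106, 5107, 6000, 6003, 6002, 6004, 6200,
           6213, 6214, 6215]),
      (28, [8000, 8001, 8002, 8003]) ] := by decide
  have hB : pvSeverities.items =
    [ ((1000:Int), (0:Int)), (1100, 0), (1101, 0), (1103, 0), (1102, 0), (2100, 0), (2101, 0), (2102, 0),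
      (2106, 0), (2107, 0), (2108, 0), (4203, 0), (4205, 0), (4213, 0), (4214, 0), (4215, 0),
      (4000, 9), (4200, 9), (4204, 9), (4208, 9), (5100, 9), (5102, 9), (5103, 9), (5104, 9),
      (5105, 9), (5106, 9), (5107, 9), (6000, 9), (6003, 9), (6002, 9), (6004, 9), (6200, 9),
      (6213, 9), (6214, 9), (6215, 9),
      (8000, 28), (8001, 28), (8002, 28), (8003, 28) ] := by decide
  obtain ⟨h1, h2, h3, h4, h5, h6, h7, h8, h9, h10, h11, h12, h13, h14, h15, h16, h17, h18,
    h19, h20, h21, h22, h23, h24, h25, h26, h27, h28, h29, h30, h31, h32, h33, h34, h35,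
    h36, h37, h38, h39⟩ := h
  constructor
  · show pvLoopA _ wc = 0
    rw [hA]
    simp only [pvLoopA, List.contains_eq_mem, List.mem_cons, List.not_mem_nil, or_false,
      decide_eq_true_eq]
    simp [h1, h2, h3, h4, h5, h6, h7, h8, h9, h10, h11, h12, h13, h14, h15, h16, h17, h18,
      h19, h20, h21, h22, h23, h24, h25, h26, h27, h28, h29, h30, h31, h32, h33, h34, h35,
      h36, h37, h38, h39]
  · show (Option.map _ (List.find? _ _)).getD 0 = 0
    rw [hB, List.find?_eq_none.mpr ?_]
    · rfl
    · intro x hx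
      fin_cases hx <;> simp <;> omega

-- ===== VERDICT (by name: the statement is the Claim_ definition above) =====
set_option maxRecDepth 10000 in
theorem get_weather_severity_spec : Claim_equal_get_weather_severity := by
  intro wc _
  unfold Spec_get_weather_severity
  by_cases h : wc ∈ pvAllCodes
  · unfold pvAllCodes at h
    fin_cases h <;> rfl
  · have := pv_unknown_eq wc h
    omega
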